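-- pv_equiv track=rewrite | github.com/habenamare/algorithm-analysis-assignment | 01-arrays.py | is_cumulative
-- ===== SOURCE A (Python) =====
-- def is_cumulative(a, length):
--    if length < 2:
--       return False
--
--    for i in range(1, length):
--       all_previous_elements_sum = 0
--
--       for j in range(0, i):
--          all_previous_elements_sum += a[j];
--
--       if all_previous_elements_sum != a[i]:
--          return False
--
--    return True
-- ===== SOURCE B (Python) =====
-- def is_cumulative(a, length):
--     if length < 2:
--         return False
--     running_sum = a[0]
--     for x in a[1:length]:
--         if x != running_sum:
--             return False
--         running_sum += x
--     return True
-- ===== Notes on version B (the rewrite author's own statement) =====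
-- stated objective: simpler
-- what changed: Replaced the nested loop that recomputes the prefix sum from scratch for every index with a single pass over a[1:length] that maintains a running prefix sum.
import Mathlib
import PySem

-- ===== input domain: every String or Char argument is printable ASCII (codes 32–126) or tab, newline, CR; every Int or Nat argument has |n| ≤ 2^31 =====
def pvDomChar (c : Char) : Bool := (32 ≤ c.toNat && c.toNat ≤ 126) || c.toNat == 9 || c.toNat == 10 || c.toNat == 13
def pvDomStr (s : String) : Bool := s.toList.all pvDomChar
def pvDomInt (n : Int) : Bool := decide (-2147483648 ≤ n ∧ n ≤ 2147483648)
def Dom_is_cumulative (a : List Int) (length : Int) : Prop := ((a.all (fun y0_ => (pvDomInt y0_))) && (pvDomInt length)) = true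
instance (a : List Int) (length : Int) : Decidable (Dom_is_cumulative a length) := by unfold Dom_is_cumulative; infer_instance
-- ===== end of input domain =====

-- B replaces A's nested loop (prefix sum recomputed from scratch per index) with a single pass keeping a running prefix sum.

-- ===== PORT A =====
-- inner loop: for j in range(0, i): sum += a[j]   (a[j] via pyGetD; in-range inside Pre_, where Python never raises)
def is_cumulative_sumPrev (a : List Int) (i : Int) : Int :=
  (PySem.List.pyRange 0 i 1).foldl (fun acc j => acc + PySem.List.pyGetD a j 0) 0

-- outer loop: for i in range(1, length), early return False (recursion on the index, as Python's lazy range)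
def is_cumulative_loop (a : List Int) (i L : Int) : Bool :=
  if _h : i < L then
    if is_cumulative_sumPrev a i ≠ PySem.List.pyGetD a i 0 then false
    else is_cumulative_loop a (i + 1) L
  else true
termination_by (L - i).toNat
decreasing_by omega

def is_cumulative (a : List Int) (length : Int) : Bool :=
  if length < 2 then false
  else is_cumulative_loop a 1 length

-- ===== PORT B =====
-- for x in a[1:length]: early return on mismatch, else add to running sum
def is_cumulative_alt_go (s : Int) : List Int → Bool
  | [] => true
  | x :: rest => if x ≠ s then false else is_cumulative_alt_go (s + x) rest

def is_cumulative_alt (a : List Int) (length : Int) : Bool :=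
  if length < 2 then false
  else is_cumulative_alt_go (PySem.List.pyGetD a 0 0)
         (PySem.List.slice a (some 1) (some length))

-- ===== PRECONDITION & SPEC =====
-- Pre_ excludes exactly the inputs where A raises IndexError: length ≥ 2, length > len(a), and
-- every in-range index satisfies the cumulative property (otherwise A returns False before reaching an out-of-range index).
def Pre_is_cumulative (a : List Int) (length : Int) : Prop :=
  length < 2 ∨ length ≤ (a.length : Int) ∨
    ∃ i ∈ List.range a.length, 1 ≤ i ∧ a.getD i 0 ≠ (a.take i).sum
instance (a : List Int) (length : Int) : Decidable (Pre_is_cumulative a length) := by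
  unfold Pre_is_cumulative; infer_instance

def pvWitness_is_cumulative : List Int × Int := ([2, 2, 4], 3)

def Spec_is_cumulative (a : List Int) (length : Int) (out : Bool) : Prop := out = is_cumulative_alt a length
instance (a : List Int) (length : Int) (out : Bool) : Decidable (Spec_is_cumulative a length out) := by unfold Spec_is_cumulative; infer_instance

-- ===== CLAIM (what is proved, stated in full; the proofs are below) =====
def Claim_equal_is_cumulative : Prop := ∀ (a : List Int) (length : Int), Dom_is_cumulative a length → Pre_is_cumulative a length → Spec_is_cumulative a length (is_cumulative a length)

-- ===== LEMMAS AND PROOFS =====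

-- A's inner loop computes the sum of the first i elements
theorem sumPrev_eq_take_sum (a : List Int) (i : Nat) (h : i ≤ a.length) :
    is_cumulative_sumPrev a (i : Int) = (a.take i).sum := by
  unfold is_cumulative_sumPrev
  induction i with
  | zero => simp
  | succ k ih =>
      rw [show ((k + 1 : Nat) : Int) = (k : Int) + 1 by push_cast; ring,
        PySem.List.pyRange_one_succ_right (by positivity), List.foldl_append]
      rw [ih (Nat.le_of_succ_le h)]
      have hk : k < a.length := h
      simp [PySem.List.pyGetD, PySem.List.pyGet?, PySem.List.pyIdx?, hk,
        List.sum_take_succ _ _ hk]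

-- main correspondence between the two loops, by induction on the remaining count m
theorem loop_eq_go (a : List Int) (k m : Nat) (hk : 1 ≤ k) (h : k + m ≤ a.length) :
    is_cumulative_loop a (k : Int) ((k + m : Nat) : Int)
      = is_cumulative_alt_go ((a.take k).sum) ((a.drop k).take m) := by
  induction m generalizing k with
  | zero =>
      rw [is_cumulative_loop]
      simp [is_cumulative_alt_go]
  | succ m ih =>
      have hkl : k < a.length := by omega
      rw [is_cumulative_loop, dif_pos (by exact_mod_cast Nat.lt_add_of_pos_right (Nat.succ_pos m))]
      have hdrop : a.drop k = a[k] :: a.drop (k + 1) := List.drop_eq_getElem_cons hkl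
      rw [hdrop]
      simp only [is_cumulative_alt_go, List.take_succ_cons]
      rw [sumPrev_eq_take_sum a k (le_of_lt hkl)]
      have hget : PySem.List.pyGetD a (k : Int) 0 = a[k] := by
        simp [PySem.List.pyGetD, PySem.List.pyGet?, PySem.List.pyIdx?, hkl]
      rw [hget]
      by_cases hc : (a.take k).sum = a[k]
      · rw [if_neg (by simp [hc]), if_neg (by simp [hc.symm])]
        rw [show ((k : Int) + 1) = ((k + 1 : Nat) : Int) by push_cast; ring,
          show ((k + (m + 1) : Nat) : Int) = (((k + 1) + m : Nat) : Int) by push_cast; ring]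
        rw [ih (k + 1) (by omega) (by omega), List.sum_take_succ _ _ hkl]
      · rw [if_pos (Ne.symm hc), if_pos hc]

-- when some in-range index violates the cumulative property, both loops hit the first violation (in range) and return false
theorem both_false (a : List Int) (i : Nat) (hi : i < a.length) (hmis : a[i] ≠ (a.take i).sum) :
    ∀ d k, i - k = d → 1 ≤ k → k ≤ i → ∀ L : Int, (i : Int) < L →
      is_cumulative_loop a (k : Int) L = false ∧
      is_cumulative_alt_go ((a.take k).sum) (a.drop k) = false := by
  intro d
  induction d with
  | zero =>
      intro k hd hk1 hki L hL
      have hk : k = i := by omega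
      subst hk
      have hkl : k < a.length := hi
      rw [is_cumulative_loop, dif_pos (by omega), List.drop_eq_getElem_cons hkl]
      have hget : PySem.List.pyGetD a (k : Int) 0 = a[k] := by
        simp [PySem.List.pyGetD, PySem.List.pyGet?, PySem.List.pyIdx?, hkl]
      simp only [is_cumulative_alt_go, hget, sumPrev_eq_take_sum a k (le_of_lt hkl)]
      exact ⟨by rw [if_pos (Ne.symm hmis)], by rw [if_pos hmis]⟩
  | succ d ih =>
      intro k hd hk1 hki L hL
      have hki' : k < i := by omega
      have hkl : k < a.length := by omega
      rw [is_cumulative_loop, dif_pos (by omega), List.drop_eq_getElem_cons hkl]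
      have hget : PySem.List.pyGetD a (k : Int) 0 = a[k] := by
        simp [PySem.List.pyGetD, PySem.List.pyGet?, PySem.List.pyIdx?, hkl]
      simp only [is_cumulative_alt_go, hget, sumPrev_eq_take_sum a k (le_of_lt hkl)]
      by_cases hc : a[k] = (a.take k).sum
      · rw [if_neg (by simp [hc]), if_neg (by simp [hc.symm])]
        have hrec := ih (k + 1) (by omega) (by omega) (by omega) L hL
        constructor
        · rw [show ((k : Int) + 1) = ((k + 1 : Nat) : Int) by push_cast; ring]
          exact hrec.1
        · rw [show (a.take k).sum + a[k] = (a.take (k + 1)).sum by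
            rw [List.sum_take_succ _ _ hkl]]
          exact hrec.2
      · exact ⟨by rw [if_pos (fun h => hc h.symm)], by rw [if_pos hc]⟩

-- ===== VERDICT (by name: the statement is the Claim_ definition above) =====
theorem is_cumulative_spec : Claim_equal_is_cumulative := by
  intro a length _ hpre
  unfold Spec_is_cumulative is_cumulative is_cumulative_alt
  by_cases hl : length < 2
  · simp [hl]
  · rw [if_neg hl, if_neg hl]
    have h2 : (2 : Int) ≤ length := by omega
    by_cases hlen : length ≤ (a.length : Int)
    swap
    · -- length exceeds len(a): Pre_ guarantees an in-range violation; both sides return false there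
      rcases hpre with h | h | ⟨i, hi, h1, hmis⟩
      · omega
      · omega
      rw [List.mem_range] at hi
      rw [List.getD_eq_getElem a 0 hi] at hmis
      have hboth := both_false a i hi hmis (i - 1) 1 (by omega) le_rfl (by omega) length (by omega)
      have hA : is_cumulative_loop a 1 length = false := by
        exact_mod_cast hboth.1
      rw [hA]
      have hne : 0 < a.length := by omega
      have hget0 : PySem.List.pyGetD a 0 0 = (a.take 1).sum := by
        match a, hne with
        | x :: xs, _ => simp [PySem.List.pyGetD, PySem.List.pyGet?, PySem.List.pyIdx?]
      have hslice : PySem.List.slice a (some 1) (some length) = a.drop 1 := by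
        rw [PySem.List.slice_toNat _ (by norm_num) (by omega)]
        norm_num
        omega
      rw [hget0, hslice, hboth.2]
    have hslice : PySem.List.slice a (some 1) (some length) = (a.drop 1).take (length.toNat - 1) := by
      rw [PySem.List.slice_toNat _ (by norm_num) (by omega)]
      norm_num
    have hget0 : PySem.List.pyGetD a 0 0 = (a.take 1).sum := by
      have h0 : 0 < a.length := by omega
      match a, h0 with
      | x :: xs, _ => simp [PySem.List.pyGetD, PySem.List.pyGet?, PySem.List.pyIdx?]
    rw [hslice, hget0]
    have key := loop_eq_go a 1 (length.toNat - 1) le_rfl (by omega)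
    rw [show ((1 + (length.toNat - 1) : Nat) : Int) = length by omega] at key
    exact_mod_cast key
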